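-- pv_equiv track=rewrite | github.com/Nghia03092004/nghia03092004.github.io | project_euler/problem_920/solution.py | sb_depth
-- ===== SOURCE A (Python) =====
-- def sb_depth(p, q):
--     """
--     Find depth of p/q in the Stern-Brocot tree by direct traversal.
--     Returns the 1-indexed depth (root mediants are at depth 1).
--     """
--     depth = 0
--     la, lb = 0, 1   # left boundary: 0/1
--     ra, rb = 1, 0   # right boundary: 1/0
--     while True:
--         ma, mb = la + ra, lb + rb  # mediant
--         if ma == p and mb == q:
--             return depth + 1
--         if p * mb < ma * q:  # p/q < ma/mb -> go left
--             ra, rb = ma, mb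
--         else:                # p/q > ma/mb -> go right
--             la, lb = ma, mb
--         depth += 1
-- ===== SOURCE B (Python) =====
-- def sb_depth(p, q):
--     """
--     Depth of p/q in the Stern-Brocot tree via the continued-fraction
--     (Euclidean) algorithm: the depth is the sum of the quotients.
--     """
--     depth = 0
--     while q:
--         depth += p // q
--         p, q = q, p % q
--     return depth
-- ===== Notes on version B (the rewrite author's own statement) =====
-- stated objective: alternative
-- what changed: Replaces the unary Stern-Brocot tree walk (one loop iteration per tree level) by the Euclidean algorithm summing the continued-fraction quotients.
import Mathlib
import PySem

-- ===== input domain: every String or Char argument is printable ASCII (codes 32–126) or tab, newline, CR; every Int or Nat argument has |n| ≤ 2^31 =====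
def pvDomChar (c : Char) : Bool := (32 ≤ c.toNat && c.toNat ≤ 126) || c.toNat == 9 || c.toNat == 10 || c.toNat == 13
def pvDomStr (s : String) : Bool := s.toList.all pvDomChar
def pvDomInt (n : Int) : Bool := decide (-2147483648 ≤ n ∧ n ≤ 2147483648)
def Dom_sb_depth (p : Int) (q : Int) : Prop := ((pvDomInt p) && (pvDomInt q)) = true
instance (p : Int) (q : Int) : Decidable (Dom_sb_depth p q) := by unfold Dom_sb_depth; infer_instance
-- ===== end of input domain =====

-- B replaces A's unary Stern-Brocot tree walk by the Euclidean algorithm summing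
-- the continued-fraction quotients (objective: alternative algorithm).

-- ===== PORT A =====
-- A's 'while True' loop, transliterated with a fuel counter that merely makes the
-- recursion total; Pre_ guarantees the fuel is never exhausted.
def sbLoopA (fuel : Nat) (p q la lb ra rb depth : Int) : Int :=
  match fuel with
  | 0 => 0
  | fuel + 1 =>
    let ma := la + ra
    let mb := lb + rb
    if ma = p ∧ mb = q then depth + 1
    else if p * mb < ma * q then sbLoopA fuel p q la lb ma mb (depth + 1)
    else sbLoopA fuel p q ma mb ra rb (depth + 1)

def sb_depth (p : Int) (q : Int) : Int :=
  sbLoopA ((p + q).natAbs + 1) p q 0 1 1 0 0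

-- ===== PORT B =====
def sbLoopB (p q depth : Int) : Int :=
  if h : q = 0 then depth
  else sbLoopB q (PySem.Int.mod p q) (depth + PySem.Int.floordiv p q)
termination_by q.natAbs
decreasing_by
  by_cases hq : 0 < q
  · have h1 := PySem.Int.mod_nonneg p hq
    have h2 := PySem.Int.mod_lt p hq
    omega
  · have hq' : q < 0 := by omega
    have h3 := PySem.Int.mod_neg_bounds p hq'
    omega

def sb_depth_alt (p : Int) (q : Int) : Int := sbLoopB p q 0

-- ===== PRECONDITION & SPEC =====
-- A returns only for positive coprime p, q (otherwise its loop never terminates).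
def Pre_sb_depth (p : Int) (q : Int) : Prop := 1 ≤ p ∧ 1 ≤ q ∧ Int.gcd p q = 1
instance (p : Int) (q : Int) : Decidable (Pre_sb_depth p q) := by unfold Pre_sb_depth; infer_instance
def pvWitness_sb_depth : Int × Int := (3, 5)

def Spec_sb_depth (p : Int) (q : Int) (out : Int) : Prop := out = sb_depth_alt p q
instance (p : Int) (q : Int) (out : Int) : Decidable (Spec_sb_depth p q out) := by unfold Spec_sb_depth; infer_instance

-- ===== CLAIM (what is proved, stated in full; the proofs are below) =====
def Claim_equal_sb_depth : Prop := ∀ (p : Int) (q : Int), Dom_sb_depth p q → Pre_sb_depth p q → Spec_sb_depth p q (sb_depth p q)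

-- ===== LEMMAS AND PROOFS =====

-- subtractive-Euclid step count: the number of loop iterations A performs, +1
def subT (a b : Nat) : Nat :=
  if a = 0 ∨ b = 0 then 0
  else if a = b then 1
  else if a < b then 1 + subT a (b - a)
  else 1 + subT (a - b) b
termination_by a + b
decreasing_by all_goals omega

-- sum of continued-fraction quotients (Nat shadow of B's loop)
def cfSum (a b : Nat) : Nat :=
  if b = 0 then 0 else a / b + cfSum b (a % b)
termination_by b
decreasing_by exact Nat.mod_lt _ (by omega)

theorem subT_le (a b : Nat) : subT a b ≤ a + b := by
  rw [subT]
  split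
  · omega
  · split
    · omega
    · split
      · have := subT_le a (b - a); omega
      · have := subT_le (a - b) b; omega
termination_by a + b
decreasing_by all_goals omega

theorem cfSum_swap_lt {a b : Nat} (h : a < b) : cfSum a b = cfSum b a := by
  rw [cfSum]
  have hb : b ≠ 0 := by omega
  simp [hb, Nat.div_eq_of_lt h, Nat.mod_eq_of_lt h]

theorem cfSum_sub {a b : Nat} (hb : 1 ≤ b) (h : b < a) : cfSum a b = 1 + cfSum (a - b) b := by
  conv_lhs => rw [cfSum]
  conv_rhs => rw [cfSum]
  simp only [if_neg (by omega : ¬ b = 0)]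
  have h1 : a / b = (a - b) / b + 1 := by
    have h2 := Nat.add_div_right (a - b) (show 0 < b by omega)
    rwa [Nat.sub_add_cancel (by omega)] at h2
  rw [h1, Nat.mod_eq_sub_mod (by omega : b ≤ a)]
  omega

theorem subT_eq_cfSum (a b : Nat) (ha : 1 ≤ a) (hb : 1 ≤ b) : subT a b = cfSum a b := by
  rw [subT]
  simp only [if_neg (by omega : ¬ (a = 0 ∨ b = 0))]
  by_cases hab : a = b
  · subst hab
    rw [cfSum, if_neg (by omega : ¬ a = 0), Nat.div_self (by omega), Nat.mod_self, cfSum]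
    simp
  · simp only [if_neg hab]
    by_cases hlt : a < b
    · simp only [if_pos hlt]
      rw [subT_eq_cfSum a (b - a) ha (by omega)]
      rw [cfSum_swap_lt hlt, cfSum_sub ha hlt]
      congr 1
      rcases Nat.lt_trichotomy a (b - a) with h | h | h
      · exact (cfSum_swap_lt h)
      · rw [← h]
      · exact (cfSum_swap_lt h).symm
    · simp only [if_neg hlt]
      have hba : b < a := by omega
      rw [subT_eq_cfSum (a - b) b (by omega) hb]
      rw [cfSum_sub hb hba]
termination_by a + b
decreasing_by all_goals omega

-- the mediant equals p/q exactly when the two "distances" β and α coincide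
theorem mediant_eq {p q la lb ra rb : Int}
    (hp : 1 ≤ p) (hq : 1 ≤ q) (hg : Int.gcd p q = 1)
    (hla : 0 ≤ la) (hlb : 0 ≤ lb) (hra : 0 ≤ ra) (hrb : 0 ≤ rb)
    (hdet : ra * lb - la * rb = 1)
    (heq : p * (lb + rb) = (la + ra) * q) :
    la + ra = p ∧ lb + rb = q := by
  set ma := la + ra with hma
  set mb := lb + rb with hmb
  have hcpq : IsCoprime q p := by
    rw [Int.isCoprime_iff_gcd_eq_one, Int.gcd_comm]; exact hg
  have hcm : IsCoprime mb ma := ⟨ra, -rb, by rw [hma, hmb]; linear_combination hdet⟩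
  have h1 : q ∣ mb := by
    refine hcpq.dvd_of_dvd_mul_right ?_
    exact ⟨ma, by linarith [heq]⟩
  have h2 : mb ∣ q := by
    refine hcm.dvd_of_dvd_mul_right ?_
    exact ⟨p, by linarith [heq]⟩
  have hqm : q = mb := Int.dvd_antisymm (by omega) (by rw [hmb]; omega) h1 h2
  constructor
  · have : p * mb = ma * q := heq
    rw [← hqm] at this
    have hq0 : q ≠ 0 := by omega
    exact (mul_right_cancel₀ hq0 (by linarith [this])).symm
  · omega

-- A's loop computes depth + subT β α, where β, α measure the distance of p/q
-- from the left/right boundary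
theorem sbLoopA_eq (fuel : Nat) (p q la lb ra rb depth : Int)
    (hp : 1 ≤ p) (hq : 1 ≤ q) (hg : Int.gcd p q = 1)
    (hla : 0 ≤ la) (hlb : 0 ≤ lb) (hra : 0 ≤ ra) (hrb : 0 ≤ rb)
    (hdet : ra * lb - la * rb = 1)
    (hb : 1 ≤ p * lb - q * la) (ha : 1 ≤ ra * q - p * rb)
    (hfuel : subT (p * lb - q * la).toNat (ra * q - p * rb).toNat ≤ fuel) :
    sbLoopA fuel p q la lb ra rb depth
      = depth + subT (p * lb - q * la).toNat (ra * q - p * rb).toNat := by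
  set β := p * lb - q * la with hβ
  set α := ra * q - p * rb with hα
  have hT1 : 1 ≤ subT β.toNat α.toNat := by
    rw [subT]
    have h1 : ¬ (β.toNat = 0 ∨ α.toNat = 0) := by omega
    simp only [if_neg h1]
    split
    · omega
    · split <;> omega
  match fuel with
  | 0 => omega
  | fuel + 1 =>
    rw [sbLoopA]
    by_cases heq : la + ra = p ∧ lb + rb = q
    · simp only [if_pos heq]
      have hβα : β = α := by
        have h1 : la + ra = p := heq.1
        have h2 : lb + rb = q := heq.2
        rw [hβ, hα]; nlinarith [h1, h2, hdet]
      have : subT β.toNat α.toNat = 1 := by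
        rw [subT]; simp only [if_neg (by omega : ¬ (β.toNat = 0 ∨ α.toNat = 0))]
        rw [if_pos (by omega : β.toNat = α.toNat)]
      rw [this]; push_cast; ring
    · simp only [if_neg heq]
      have hne : β ≠ α := by
        intro hc
        exact heq (mediant_eq hp hq hg hla hlb hra hrb hdet (by rw [hβ, hα] at hc; linarith))
      have hkey : p * (lb + rb) - (la + ra) * q = β - α := by rw [hβ, hα]; ring
      by_cases hlt : p * (lb + rb) < (la + ra) * q
      · -- go left: new right boundary = mediant; new α = α - β
        simp only [if_pos hlt]
        have hβα : β < α := by omega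
        have hrec := sbLoopA_eq fuel p q la lb (la + ra) (lb + rb) (depth + 1)
          hp hq hg hla hlb (by omega) (by omega)
          (by nlinarith [hdet]) hb (by omega) ?_
        · rw [hrec]
          have hα' : (la + ra) * q - p * (lb + rb) = α - β := by rw [hβ, hα]; ring
          rw [hα']
          have hs : subT β.toNat α.toNat = 1 + subT β.toNat (α - β).toNat := by
            rw [subT]
            simp only [if_neg (by omega : ¬ (β.toNat = 0 ∨ α.toNat = 0))]
            rw [if_neg (by omega : ¬ β.toNat = α.toNat), if_pos (by omega : β.toNat < α.toNat)]
            congr 2 <;> omega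
          rw [hs]; push_cast; ring
        · have hα' : (la + ra) * q - p * (lb + rb) = α - β := by rw [hβ, hα]; ring
          rw [hα', ← hβ]
          have hs : subT β.toNat α.toNat = 1 + subT β.toNat (α - β).toNat := by
            rw [subT]
            simp only [if_neg (by omega : ¬ (β.toNat = 0 ∨ α.toNat = 0))]
            rw [if_neg (by omega : ¬ β.toNat = α.toNat), if_pos (by omega : β.toNat < α.toNat)]
            congr 2 <;> omega
          omega
      · -- go right: new left boundary = mediant; new β = β - α
        simp only [if_neg hlt]
        have hβα : α < β := by omega
        have hrec := sbLoopA_eq fuel p q (la + ra) (lb + rb) ra rb (depth + 1)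
          hp hq hg (by omega) (by omega) hra hrb
          (by nlinarith [hdet])
          (by
            have he : p * (lb + rb) - q * (la + ra) = β - α := by rw [hβ, hα]; ring
            omega) ha ?_
        · rw [hrec]
          have hβ' : p * (lb + rb) - q * (la + ra) = β - α := by rw [hβ, hα]; ring
          rw [hβ']
          have hs : subT β.toNat α.toNat = 1 + subT (β - α).toNat α.toNat := by
            rw [subT]
            simp only [if_neg (by omega : ¬ (β.toNat = 0 ∨ α.toNat = 0))]
            rw [if_neg (by omega : ¬ β.toNat = α.toNat), if_neg (by omega : ¬ β.toNat < α.toNat)]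
            congr 2 <;> omega
          rw [hs]; push_cast; ring
        · have hβ' : p * (lb + rb) - q * (la + ra) = β - α := by rw [hβ, hα]; ring
          rw [hβ', ← hα]
          have hs : subT β.toNat α.toNat = 1 + subT (β - α).toNat α.toNat := by
            rw [subT]
            simp only [if_neg (by omega : ¬ (β.toNat = 0 ∨ α.toNat = 0))]
            rw [if_neg (by omega : ¬ β.toNat = α.toNat), if_neg (by omega : ¬ β.toNat < α.toNat)]
            congr 2 <;> omega
          omega

-- B's loop computes depth + cfSum p q (over the corresponding naturals)
theorem sbLoopB_eq (a b : Nat) (depth : Int) :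
    sbLoopB (a : Int) (b : Int) depth = depth + cfSum a b := by
  rw [sbLoopB, cfSum]
  by_cases hb : b = 0
  · simp [hb]
  · have hb' : (b : Int) ≠ 0 := by exact_mod_cast hb
    rw [dif_neg hb']
    rw [PySem.Int.mod_natCast, PySem.Int.floordiv_natCast]
    rw [sbLoopB_eq b (a % b) (depth + (a / b : Nat))]
    simp only [if_neg hb]
    push_cast; ring
termination_by b
decreasing_by exact Nat.mod_lt _ (by omega)

-- ===== VERDICT (by name: the statement is the Claim_ definition above) =====
theorem sb_depth_spec : Claim_equal_sb_depth := by
  intro p q _ hpre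
  obtain ⟨hp, hq, hg⟩ := hpre
  unfold Spec_sb_depth sb_depth sb_depth_alt
  have hA := sbLoopA_eq ((p + q).natAbs + 1) p q 0 1 1 0 0
    hp hq hg (by omega) (by omega) (by omega) (by omega) (by ring)
    (by omega) (by omega)
    (by
      have h1 := subT_le (p * 1 - q * 0).toNat (1 * q - p * 0).toNat
      omega)
  rw [show p * 1 - q * 0 = p from by ring, show 1 * q - p * 0 = q from by ring] at hA
  have hB : sbLoopB p q 0 = (0 : Int) + cfSum p.toNat q.toNat := by
    have := sbLoopB_eq p.toNat q.toNat 0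
    rwa [Int.toNat_of_nonneg (by omega), Int.toNat_of_nonneg (by omega)] at this
  rw [hA, hB, subT_eq_cfSum p.toNat q.toNat (by omega) (by omega)]
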